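-- pv_equiv track=rewrite | github.com/nursenataskiran/Code-Aware-RAG | src/chunking/notebook_chunker.py | _extract_first_markdown_header
-- ===== SOURCE A (Python) =====
-- def _extract_first_markdown_header(text: str):
--     for line in text.splitlines():
--         stripped = line.strip()
--         if stripped.startswith("#"):
--             return stripped.lstrip("#").strip()
--     for line in text.splitlines():
--         stripped = line.strip()
--         if stripped:
--             return stripped[:80]
--     return None
-- ===== SOURCE B (Python) =====
-- def _extract_first_markdown_header(text: str):
--     first_nonempty = None
--     for line in text.splitlines():
--         stripped = line.strip()
--         if stripped.startswith("#"):
--             return stripped.lstrip("#").strip()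
--         if stripped and first_nonempty is None:
--             first_nonempty = stripped[:80]
--     return first_nonempty
-- ===== Notes on version B (the rewrite author's own statement) =====
-- stated objective: simpler
-- what changed: Replaces A's two separate scans of text.splitlines() with a single pass that returns on the first header and carries the first non-empty line in an accumulator as fallback.
import Mathlib
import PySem

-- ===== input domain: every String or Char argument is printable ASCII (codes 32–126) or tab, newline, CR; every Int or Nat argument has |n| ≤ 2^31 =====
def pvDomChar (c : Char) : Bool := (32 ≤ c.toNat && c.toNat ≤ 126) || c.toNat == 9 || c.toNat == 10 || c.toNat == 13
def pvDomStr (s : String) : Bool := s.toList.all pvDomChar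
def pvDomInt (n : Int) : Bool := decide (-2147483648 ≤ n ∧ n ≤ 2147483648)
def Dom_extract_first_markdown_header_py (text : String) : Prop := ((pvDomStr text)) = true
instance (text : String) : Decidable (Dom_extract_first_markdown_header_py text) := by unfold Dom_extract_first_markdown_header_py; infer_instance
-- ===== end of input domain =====

-- B merges A's two scans into one pass that returns on the first header and keeps the first non-empty line as fallback; return value proved equal everywhere.

-- ===== PORT A =====
-- stripped.lstrip("#"): drop leading '#' characters (exact: lstrip with a char set drops exactly those leading chars)
def pvLstripHash (s : String) : String := String.ofList (s.toList.dropWhile (· == '#'))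

-- first loop of A: return stripped.lstrip('#').strip() at the first line whose strip starts with '#'
def pvFirstPassA : List String → Option String
  | [] => none
  | l :: ls =>
    let stripped := PySem.Str.strip l
    if PySem.Str.startswith stripped "#" then some (PySem.Str.strip (pvLstripHash stripped))
    else pvFirstPassA ls

-- second loop of A: return stripped[:80] at the first line whose strip is non-empty
def pvSecondPassA : List String → Option String
  | [] => none
  | l :: ls =>
    let stripped := PySem.Str.strip l
    if stripped ≠ "" then some (PySem.Str.slice stripped none (some 80))
    else pvSecondPassA ls

def extract_first_markdown_header_py (text : String) : Option String :=
  match pvFirstPassA (PySem.Str.splitlines text) with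
  | some r => some r
  | none => pvSecondPassA (PySem.Str.splitlines text)

-- ===== PORT B =====
-- single loop of B with the accumulator first_nonempty
def pvScanB : List String → Option String → Option String
  | [], first_nonempty => first_nonempty
  | l :: ls, first_nonempty =>
    let stripped := PySem.Str.strip l
    if PySem.Str.startswith stripped "#" then some (PySem.Str.strip (pvLstripHash stripped))
    else
      pvScanB ls
        (if stripped ≠ "" ∧ first_nonempty = none then some (PySem.Str.slice stripped none (some 80))
         else first_nonempty)

def extract_first_markdown_header_py_alt (text : String) : Option String :=
  pvScanB (PySem.Str.splitlines text) none

-- ===== PRECONDITION & SPEC =====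
def Spec_extract_first_markdown_header_py (text : String) (out : Option String) : Prop := out = extract_first_markdown_header_py_alt text
instance (text : String) (out : Option String) : Decidable (Spec_extract_first_markdown_header_py text out) := by unfold Spec_extract_first_markdown_header_py; infer_instance

-- ===== CLAIM (what is proved, stated in full; the proofs are below) =====
def Claim_equal_extract_first_markdown_header_py : Prop := ∀ (text : String), Dom_extract_first_markdown_header_py text → Spec_extract_first_markdown_header_py text (extract_first_markdown_header_py text)

-- ===== LEMMAS AND PROOFS =====

-- loop invariant of B's single pass: it computes A's first pass, with the accumulator
-- (else A's second pass) as fallback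
theorem pvScanB_eq (lines : List String) (acc : Option String) :
    pvScanB lines acc =
      match pvFirstPassA lines with
      | some r => some r
      | none => match acc with
                | some a => some a
                | none => pvSecondPassA lines := by
  induction lines generalizing acc with
  | nil => cases acc <;> simp [pvScanB, pvFirstPassA, pvSecondPassA]
  | cons l ls ih =>
    simp only [pvScanB, pvFirstPassA, pvSecondPassA]
    by_cases hhash : PySem.Str.startswith (PySem.Str.strip l) "#" = true
    · rw [if_pos hhash, if_pos hhash]
    · rw [if_neg hhash, if_neg hhash]
      rw [ih]
      cases acc with
      | some a => simp
      | none =>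
        by_cases hne : PySem.Str.strip l = ""
        · simp [hne]
        · simp [hne]

theorem extract_first_markdown_header_py_spec : Claim_equal_extract_first_markdown_header_py := by
  intro text _
  show extract_first_markdown_header_py text = extract_first_markdown_header_py_alt text
  unfold extract_first_markdown_header_py extract_first_markdown_header_py_alt
  rw [pvScanB_eq]
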